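-- pv_equiv track=rewrite | github.com/ZiQax/tugas_pertemuan_7_matematika_diskrit | Mate_diskrit/Relasi.py | relation_matrix
-- ===== SOURCE A (Python) =====
-- from typing import Set, Tuple, List
--
-- Pair = Tuple[int, int] # tipe untuk pasangan terurut; bisa diganti ke generik jika mau
--
-- def relation_matrix(A_sorted: List[int], R: Set[Pair]) -> List[List[int]]:
-- 	"""Buat matriks biner representasi relasi. A_sorted harus urutan elemen A yang konsisten."""
-- 	idx = {a: i for i, a in enumerate(A_sorted)}
-- 	n = len(A_sorted)
-- 	M = [[0]*n for _ in range(n)]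
-- 	for (a, b) in R:
-- 		if a in idx and b in idx:
-- 			M[idx[a]][idx[b]] = 1
-- 	return M
-- ===== SOURCE B (Python) =====
-- from typing import Set, Tuple, List
--
-- Pair = Tuple[int, int]
--
-- def relation_matrix(A_sorted: List[int], R: Set[Pair]) -> List[List[int]]:
--     """Matriks biner relasi: scan semua sel dan uji keanggotaan pasangan di R."""
--     Rset = set(R)
--     return [[1 if (a, b) in Rset else 0 for b in A_sorted] for a in A_sorted]
-- ===== Notes on version B (the rewrite author's own statement) =====
-- stated objective: idiomatic
-- what changed: Instead of building a zero matrix and scattering 1s by looking each pair of R up in an element->index dict, B scans every output cell (a,b) of the A_sorted x A_sorted grid and emits 1 iff the pair is in R, so the index dict and the in-place updates disappear.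
-- outside the precondition, e.g. on relation_matrix([1, 1], {(1, 1)}): A returns [[0, 0], [0, 1]], B returns [[1, 1], [1, 1]]
import Mathlib
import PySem

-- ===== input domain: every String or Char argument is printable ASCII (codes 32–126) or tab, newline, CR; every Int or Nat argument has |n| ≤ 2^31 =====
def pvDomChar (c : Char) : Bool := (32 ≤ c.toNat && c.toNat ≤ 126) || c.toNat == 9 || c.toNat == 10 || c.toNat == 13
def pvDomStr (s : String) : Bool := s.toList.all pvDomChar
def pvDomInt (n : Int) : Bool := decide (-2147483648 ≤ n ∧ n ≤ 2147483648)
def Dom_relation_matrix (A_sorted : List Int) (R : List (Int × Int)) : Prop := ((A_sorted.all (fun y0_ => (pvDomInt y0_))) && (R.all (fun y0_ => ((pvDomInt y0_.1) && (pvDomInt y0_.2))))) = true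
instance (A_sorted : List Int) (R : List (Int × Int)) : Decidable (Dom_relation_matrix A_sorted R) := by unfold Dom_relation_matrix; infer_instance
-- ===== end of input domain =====

-- B replaces A's scatter loop (element->index dict + in-place writes into a zero
-- matrix) by a membership-driven scan of every grid cell; idiomatic, same cost.
-- A iterates over the Python set R; all its writes store the constant 1, so the
-- (unmodelled) set iteration order cannot affect the result.

-- ===== PORT A =====
def relation_matrix (A_sorted : List Int) (R : List (Int × Int)) : List (List Int) :=
  let idx : PySem.Dict Int Int :=
    (PySem.List.enumerate A_sorted).foldl (fun d p => d.insert p.2 p.1) PySem.Dict.empty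
  let n := A_sorted.length
  let M : List (List Int) := List.replicate n (List.replicate n 0)
  R.foldl (fun M p =>
    if idx.contains p.1 && idx.contains p.2 then
      PySem.List.pySetD M (idx.getD p.1 0)
        (PySem.List.pySetD (PySem.List.pyGetD M (idx.getD p.1 0) []) (idx.getD p.2 0) 1)
    else M) M

-- ===== PORT B =====
def relation_matrix_alt (A_sorted : List Int) (R : List (Int × Int)) : List (List Int) :=
  let rset := PySem.Set.ofList R
  A_sorted.map (fun a => A_sorted.map (fun b => if (a, b) ∈ rset then 1 else 0))

-- ===== PRECONDITION & SPEC =====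
-- Pre_ excludes inputs where some pair of R has both components in A_sorted and a
-- component that occurs more than once there: on those A's dict keeps only the LAST
-- index of the repeated value (an accident of dict overwrite) and marks a single
-- cell, while B marks every matching cell; both corner behaviours are defensible.
def Pre_relation_matrix (A_sorted : List Int) (R : List (Int × Int)) : Prop :=
  ∀ p ∈ R, p.1 ∈ A_sorted → p.2 ∈ A_sorted →
    A_sorted.count p.1 = 1 ∧ A_sorted.count p.2 = 1
instance (A_sorted : List Int) (R : List (Int × Int)) : Decidable (Pre_relation_matrix A_sorted R) := by unfold Pre_relation_matrix; infer_instance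

def pvWitness_relation_matrix : List Int × (List (Int × Int)) := ([1, 2], [(1, 2)])

def Spec_relation_matrix (A_sorted : List Int) (R : List (Int × Int)) (out : List (List Int)) : Prop := out = relation_matrix_alt A_sorted R
instance (A_sorted : List Int) (R : List (Int × Int)) (out : List (List Int)) : Decidable (Spec_relation_matrix A_sorted R out) := by unfold Spec_relation_matrix; infer_instance

-- ===== CLAIM (what is proved, stated in full; the proofs are below) =====
def Claim_equal_relation_matrix : Prop := ∀ (A_sorted : List Int) (R : List (Int × Int)), Dom_relation_matrix A_sorted R → Pre_relation_matrix A_sorted R → Spec_relation_matrix A_sorted R (relation_matrix A_sorted R)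

-- ===== LEMMAS AND PROOFS =====

-- the index dict A builds, and the body of A's scatter loop (proof-side names)
def pvIdx (A : List Int) : PySem.Dict Int Int :=
  (PySem.List.enumerate A).foldl (fun d p => d.insert p.2 p.1) PySem.Dict.empty

def pvStep (idx : PySem.Dict Int Int) (M : List (List Int)) (p : Int × Int) : List (List Int) :=
  if idx.contains p.1 && idx.contains p.2 then
    PySem.List.pySetD M (idx.getD p.1 0)
      (PySem.List.pySetD (PySem.List.pyGetD M (idx.getD p.1 0) []) (idx.getD p.2 0) 1)
  else M

theorem relation_matrix_eq (A : List Int) (R : List (Int × Int)) :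
    relation_matrix A R =
      R.foldl (pvStep (pvIdx A))
        (List.replicate A.length (List.replicate A.length 0)) := rfl

theorem mem_enumerate {α : Type} (xs : List α) :
    ∀ (s i : Int) (a : α), (i, a) ∈ PySem.List.enumerate xs s ↔
      ∃ k : Nat, k < xs.length ∧ i = s + k ∧ xs[k]? = some a := by
  induction xs with
  | nil => intro s i a; simp [PySem.List.enumerate_nil]
  | cons x xs ih =>
    intro s i a
    simp only [PySem.List.enumerate_cons, List.mem_cons, Prod.mk.injEq, ih]
    constructor
    · rintro (⟨hi, ha⟩ | ⟨k, hk, hi, ha⟩)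
      · exact ⟨0, by simp, by omega, by simp [ha]⟩
      · exact ⟨k + 1, by simp; omega, by omega, by simpa using ha⟩
    · rintro ⟨k, hk, hi, ha⟩
      cases k with
      | zero =>
        left
        refine ⟨by omega, ?_⟩
        simpa using ha.symm
      | succ k =>
        right
        exact ⟨k, by simp at hk; omega, by omega, by simpa using ha⟩

-- a value occurring at most once sits at a unique position
theorem pvCount_uniq (A : List Int) (a : Int) :
    ∀ (i k : Nat) (hi : i < A.length) (hk : k < A.length), A.count a ≤ 1 →
      A[i] = a → A[k] = a → i = k := by
  induction A with
  | nil => intro i k hi _ _ _ _; simp at hi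
  | cons x xs ih =>
    intro i k hi hk hc hia hka
    cases i with
    | zero =>
      cases k with
      | zero => rfl
      | succ k =>
        exfalso
        simp only [List.getElem_cons_zero] at hia
        simp only [List.getElem_cons_succ] at hka
        have h1 : 0 < xs.count a :=
          List.count_pos_iff.mpr (hka ▸ List.getElem_mem (by simpa using hk))
        simp [hia] at hc
        omega
    | succ i =>
      cases k with
      | zero =>
        exfalso
        simp only [List.getElem_cons_zero] at hka
        simp only [List.getElem_cons_succ] at hia
        have h1 : 0 < xs.count a :=
          List.count_pos_iff.mpr (hia ▸ List.getElem_mem (by simpa using hi))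
        simp [hka] at hc
        omega
      | succ k =>
        have hc' : xs.count a ≤ 1 := by
          rw [List.count_cons] at hc
          split at hc <;> omega
        have : i = k := ih i k (by simpa using hi) (by simpa using hk) hc'
            (by simpa using hia) (by simpa using hka)
        omega

-- the overwrite fold behind A's dict: a lookup finds the LAST inserted value
theorem pvFoldl_get? :
    ∀ (l : List (Int × Int)) (d : PySem.Dict Int Int) (a : Int),
      (l.foldl (fun d p => d.insert p.2 p.1) d).get? a =
        match l.reverse.find? (fun p => p.2 == a) with
        | some p => some p.1
        | none => d.get? a := by
  intro l
  induction l with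
  | nil => intro d a; rfl
  | cons x l ih =>
    intro d a
    simp only [List.foldl_cons, List.reverse_cons]
    rw [ih, List.find?_append]
    rcases h : l.reverse.find? (fun p => p.2 == a) with _ | p
    · by_cases hxa : x.2 = a
      · simp [h, hxa]
      · simp [h, hxa, PySem.Dict.get?_insert, Ne.symm hxa]
    · simp [h]

theorem pvIdx_get?_eq (A : List Int) (a : Int) :
    (pvIdx A).get? a =
      match (PySem.List.enumerate A).reverse.find? (fun p => p.2 == a) with
      | some p => some p.1
      | none => none := by
  unfold pvIdx
  rw [pvFoldl_get?]
  rcases h : (PySem.List.enumerate A).reverse.find? (fun p => p.2 == a) with _ | p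
  · simp [h, PySem.Dict.get?_empty]
  · simp [h]

theorem pvIdx_get?_none (A : List Int) (a : Int) :
    (pvIdx A).get? a = none ↔ a ∉ A := by
  rw [pvIdx_get?_eq]
  rcases h : (PySem.List.enumerate A).reverse.find? (fun p => p.2 == a) with _ | p
  · simp only [h, true_iff]
    rw [List.find?_eq_none] at h
    intro hm
    have : a ∈ (PySem.List.enumerate A).map (·.2) := by
      rw [PySem.List.map_snd_enumerate]; exact hm
    obtain ⟨p, hp, hpa⟩ := List.mem_map.mp this
    exact absurd (by simpa using hpa) (by simpa using h p (List.mem_reverse.mpr hp))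
  · simp only [h, reduceCtorEq, false_iff, not_not]
    have hpm : p ∈ PySem.List.enumerate A :=
      List.mem_reverse.mp (List.mem_of_find?_eq_some h)
    have hpa : p.2 = a := by simpa using List.find?_some h
    rw [← hpa, ← PySem.List.map_snd_enumerate A]
    exact List.mem_map_of_mem hpm

theorem pvIdx_get?_some (A : List Int) (a i : Int)
    (h : (pvIdx A).get? a = some i) :
    ∃ k : Nat, k < A.length ∧ i = (k : Int) ∧ A[k]? = some a := by
  rw [pvIdx_get?_eq] at h
  rcases hf : (PySem.List.enumerate A).reverse.find? (fun p => p.2 == a) with _ | p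
  · rw [hf] at h; cases h
  · rw [hf] at h
    have hpm : p ∈ PySem.List.enumerate A :=
      List.mem_reverse.mp (List.mem_of_find?_eq_some hf)
    have hpa : p.2 = a := by simpa using List.find?_some hf
    obtain ⟨k, hk, h1, h2⟩ := (mem_enumerate A 0 p.1 p.2).mp (by
      rw [(by rfl : (p.1, p.2) = p)]; exact hpm)
    refine ⟨k, hk, ?_, by rw [h2, hpa]⟩
    simp only [Option.some.injEq] at h
    omega

-- what one pass of A's scatter loop does: nothing (a pair outside A × A), or set
-- the cell addressed by the dict's indices for the pair
theorem pvStep_eq (A : List Int) (M : List (List Int)) (p : Int × Int) :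
    ((p.1 ∉ A ∨ p.2 ∉ A) ∧ pvStep (pvIdx A) M p = M) ∨
      ∃ k1 k2 : Nat, k1 < A.length ∧ k2 < A.length ∧
        A[k1]? = some p.1 ∧ A[k2]? = some p.2 ∧
        pvStep (pvIdx A) M p = M.set k1 ((M.getD k1 []).set k2 1) := by
  rcases h1 : (pvIdx A).get? p.1 with _ | i1
  · left
    refine ⟨Or.inl ((pvIdx_get?_none A p.1).mp h1), ?_⟩
    unfold pvStep
    have : (pvIdx A).contains p.1 = false := by
      rw [PySem.Dict.contains_eq_isSome_get?, h1]; rfl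
    simp [this]
  · rcases h2 : (pvIdx A).get? p.2 with _ | i2
    · left
      refine ⟨Or.inr ((pvIdx_get?_none A p.2).mp h2), ?_⟩
      unfold pvStep
      have : (pvIdx A).contains p.2 = false := by
        rw [PySem.Dict.contains_eq_isSome_get?, h2]; rfl
      simp [this]
    · right
      obtain ⟨k1, hk1, hi1, ha1⟩ := pvIdx_get?_some A p.1 i1 h1
      obtain ⟨k2, hk2, hi2, ha2⟩ := pvIdx_get?_some A p.2 i2 h2
      refine ⟨k1, k2, hk1, hk2, ha1, ha2, ?_⟩
      unfold pvStep
      have hc1 : (pvIdx A).contains p.1 = true := by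
        rw [PySem.Dict.contains_eq_isSome_get?, h1]; rfl
      have hc2 : (pvIdx A).contains p.2 = true := by
        rw [PySem.Dict.contains_eq_isSome_get?, h2]; rfl
      have hd1 : (pvIdx A).getD p.1 0 = i1 := PySem.Dict.getD_of_get?_eq_some _ 0 h1
      have hd2 : (pvIdx A).getD p.2 0 = i2 := PySem.Dict.getD_of_get?_eq_some _ 0 h2
      rw [hd1, hd2, hi1, hi2] at *
      simp [hc1, hc2, pysem]

-- cell (j) of a row update, and row (i) of a matrix update, through List.getD
theorem pvGetD_set {α : Type} (xs : List α) (m k : Nat) (v d : α) :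
    (xs.set m v).getD k d = if k = m ∧ m < xs.length then v else xs.getD k d := by
  simp only [List.getD_eq_getElem?_getD, List.getElem?_set]
  split_ifs with h1 h2 h3 h4 <;> simp_all

-- A's scatter loop preserves the n × n shape
theorem pvFoldl_shape (A : List Int) :
    ∀ (R : List (Int × Int)) (M : List (List Int)), M.length = A.length →
      (∀ r ∈ M, r.length = A.length) →
      (R.foldl (pvStep (pvIdx A)) M).length = A.length ∧
        ∀ r ∈ R.foldl (pvStep (pvIdx A)) M, r.length = A.length := by
  intro R
  induction R with
  | nil => intro M h1 h2; exact ⟨h1, h2⟩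
  | cons p R ih =>
    intro M h1 h2
    simp only [List.foldl_cons]
    rcases pvStep_eq A M p with ⟨_, he⟩ | ⟨k1, k2, hk1, hk2, _, _, he⟩
    · rw [he]; exact ih M h1 h2
    · rw [he]
      apply ih
      · simpa using h1
      · intro r hr
        rcases List.mem_or_eq_of_mem_set hr with hr' | hr'
        · exact h2 r hr'
        · subst hr'
          rw [List.length_set]
          exact h2 _ (by
            rw [List.getD_eq_getElem _ _ (by omega : k1 < M.length)]
            exact List.getElem_mem _)

-- entry (i, j) after the scatter loop: 1 where (A[i], A[j]) ∈ R, else untouched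
theorem pvFoldl_entry (A : List Int) :
    ∀ (R : List (Int × Int)),
      (∀ p ∈ R, p.1 ∈ A → p.2 ∈ A → A.count p.1 = 1 ∧ A.count p.2 = 1) →
      ∀ (M : List (List Int)), M.length = A.length →
      (∀ r ∈ M, r.length = A.length) →
      ∀ i j : Nat, i < A.length → j < A.length →
        ((R.foldl (pvStep (pvIdx A)) M).getD i []).getD j 0 =
          if (A.getD i 0, A.getD j 0) ∈ R then 1 else (M.getD i []).getD j 0 := by
  intro R
  induction R with
  | nil => intro _ M _ _ i j _ _; simp
  | cons p R ih =>
    intro hP M h1 h2 i j hi hj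
    have hPt : ∀ q ∈ R, q.1 ∈ A → q.2 ∈ A → A.count q.1 = 1 ∧ A.count q.2 = 1 :=
      fun q hq => hP q (List.mem_cons_of_mem _ hq)
    simp only [List.foldl_cons]
    rw [ih hPt (pvStep (pvIdx A) M p)
          (pvFoldl_shape A [p] M h1 h2).1 (pvFoldl_shape A [p] M h1 h2).2
          i j hi hj]
    have hAi : A.getD i 0 = A[i] := List.getD_eq_getElem A 0 hi
    have hAj : A.getD j 0 = A[j] := List.getD_eq_getElem A 0 hj
    by_cases hR : (A.getD i 0, A.getD j 0) ∈ R
    · rw [if_pos hR, if_pos (List.mem_cons_of_mem _ hR)]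
    · simp only [hR, if_false, List.mem_cons, or_false]
      rcases pvStep_eq A M p with ⟨hout, he⟩ | ⟨k1, k2, hk1, hk2, ha1, ha2, he⟩
      · rw [he]
        have hne : (A.getD i 0, A.getD j 0) ≠ p := by
          intro hp
          rcases hout with h | h
          · exact h (by rw [← hp]; rw [hAi]; exact List.getElem_mem hi)
          · exact h (by rw [← hp]; rw [hAj]; exact List.getElem_mem hj)
        rw [if_neg hne]
      · rw [he]
        have hk1A : A[k1] = p.1 := by
          have := List.getElem?_eq_getElem hk1; rw [ha1] at this; injection this with h; exact h.symm
        have hk2A : A[k2] = p.2 := by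
          have := List.getElem?_eq_getElem hk2; rw [ha2] at this; injection this with h; exact h.symm
        have hmem1 : p.1 ∈ A := hk1A ▸ List.getElem_mem hk1
        have hmem2 : p.2 ∈ A := hk2A ▸ List.getElem_mem hk2
        have hcnt := hP p (List.mem_cons_self) hmem1 hmem2
        have hrowlen : (M.getD k1 []).length = A.length := by
          rw [List.getD_eq_getElem _ _ (by omega : k1 < M.length)]
          exact h2 _ (List.getElem_mem _)
        rw [pvGetD_set]
        have hiff : ((A.getD i 0, A.getD j 0) = p) ↔ (i = k1 ∧ j = k2) := by
          constructor
          · intro hp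
            have hp1 : A[i] = A[k1] := by
              rw [hk1A, ← hAi]; exact congrArg Prod.fst hp
            have hp2 : A[j] = A[k2] := by
              rw [hk2A, ← hAj]; exact congrArg Prod.snd hp
            constructor
            · exact pvCount_uniq A A[k1] i k1 hi hk1 (by rw [hk1A]; omega) hp1 rfl
            · exact pvCount_uniq A A[k2] j k2 hj hk2 (by rw [hk2A]; omega) hp2 rfl
          · rintro ⟨hik, hjk⟩
            subst hik; subst hjk
            rw [hAi, hAj, hk1A, hk2A]
        by_cases hik1 : i = k1
        · rw [if_pos ⟨hik1, by omega⟩, pvGetD_set]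
          by_cases hjk2 : j = k2
          · rw [if_pos ⟨hjk2, by omega⟩, if_pos (hiff.mpr ⟨hik1, hjk2⟩)]
          · rw [if_neg (fun h => hjk2 h.1),
              if_neg (fun hp => hjk2 (hiff.mp hp).2), hik1]
        · rw [if_neg (fun h => hik1 h.1), if_neg (fun hp => hik1 (hiff.mp hp).1)]

-- ===== VERDICT (by name: the statement is the Claim_ definition above) =====
theorem relation_matrix_spec : Claim_equal_relation_matrix := by
  intro A R _ hpre
  unfold Spec_relation_matrix
  rw [relation_matrix_eq]
  have hshape := pvFoldl_shape A R
    (List.replicate A.length (List.replicate A.length 0))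
    (by simp) (by intro r hr; simp_all [List.eq_of_mem_replicate hr])
  have hlen : (relation_matrix_alt A R).length = A.length := by
    simp [relation_matrix_alt]
  apply List.ext_getElem (by rw [hshape.1, hlen])
  intro i hi1 hi2
  have hin : i < A.length := by rw [hshape.1] at hi1; exact hi1
  have hrowA : (R.foldl (pvStep (pvIdx A))
      (List.replicate A.length (List.replicate A.length 0)))[i].length = A.length :=
    hshape.2 _ (List.getElem_mem _)
  apply List.ext_getElem
  · rw [hrowA]
    simp [relation_matrix_alt]
  intro j hj1 hj2
  have hjn : j < A.length := by rw [hrowA] at hj1; exact hj1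
  have hent := pvFoldl_entry A R hpre
    (List.replicate A.length (List.replicate A.length 0))
    (by simp) (by intro r hr; simp_all [List.eq_of_mem_replicate hr]) i j hin hjn
  rw [List.getD_eq_getElem _ _ hi1, List.getD_eq_getElem _ _ hj1] at hent
  rw [hent]
  simp [relation_matrix_alt, PySem.Set.mem_ofList, hin, hjn]
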